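-- pv_equiv track=rewrite | github.com/Axdion/kata-codewar | RGB To Hex Conversion.py | dec_to_hexdec
-- ===== SOURCE A (Python) =====
-- def dec_to_hexdec(number:int):
--     hexdecimal = ''
--     if number <= 0:
--         return '00'
--     elif number > 255:
--         return 'FF'
--     while number !=0:
--         digit = number %16
--         if digit == 10:
--             hexdecimal = 'A'+hexdecimal
--         elif digit == 11:
--             hexdecimal = 'B'+hexdecimal
--         elif digit == 12:
--             hexdecimal = 'C'+hexdecimal
--         elif digit == 13:
--             hexdecimal = 'D'+hexdecimal
--         elif digit == 14:
--             hexdecimal = 'E'+hexdecimal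
--         elif digit == 15:
--             hexdecimal = 'F'+hexdecimal
--         else:
--             hexdecimal = str(digit) + hexdecimal
--         number = number // 16
--
--     return hexdecimal if len(hexdecimal)==2 else '0'+hexdecimal
-- ===== SOURCE B (Python) =====
-- def dec_to_hexdec(number: int):
--     if number <= 0:
--         return '00'
--     if number > 255:
--         return 'FF'
--     return '%02X' % number
-- ===== Notes on version B (the rewrite author's own statement) =====
-- stated objective: idiomatic
-- what changed: Keeps the two clamp guards but replaces the digit-by-digit while loop with its manual letter lookup and padding by a single closed-form '%02X' format.
import Mathlib
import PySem

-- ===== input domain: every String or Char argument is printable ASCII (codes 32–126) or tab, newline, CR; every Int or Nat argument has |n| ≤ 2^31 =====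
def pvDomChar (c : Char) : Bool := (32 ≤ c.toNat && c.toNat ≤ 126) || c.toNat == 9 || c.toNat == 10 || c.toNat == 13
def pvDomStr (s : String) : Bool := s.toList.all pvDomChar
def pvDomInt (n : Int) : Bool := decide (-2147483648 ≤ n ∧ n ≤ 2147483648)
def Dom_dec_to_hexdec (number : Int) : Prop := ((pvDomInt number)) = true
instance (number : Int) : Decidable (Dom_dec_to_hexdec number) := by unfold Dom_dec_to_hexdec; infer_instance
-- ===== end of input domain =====

-- B replaces A's digit-by-digit while loop (manual letter lookup + padding) with a closed-form
-- two-digit hex rendering, keeping the two clamp guards; idiomatic, same cost.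


-- ===== PORT A =====
-- digit mapping of A's if/elif chain inside the loop
def pvHexDigitA (d : Int) : String :=
  if d == 10 then "A"
  else if d == 11 then "B"
  else if d == 12 then "C"
  else if d == 13 then "D"
  else if d == 14 then "E"
  else if d == 15 then "F"
  else PySem.Int.toStr d

-- A's while loop; fuel only makes the recursion total (loop is reached with 1 ≤ n ≤ 255)
def pvLoopA : Nat → Int → String → String
  | 0, _, acc => acc
  | fuel + 1, n, acc =>
    if n == 0 then acc
    else pvLoopA fuel (PySem.Int.floordiv n 16)
           (pvHexDigitA (PySem.Int.mod n 16) ++ acc)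

def dec_to_hexdec (number : Int) : String :=
  if number ≤ 0 then "00"
  else if number > 255 then "FF"
  else
    let hexdecimal := pvLoopA 64 number ""
    if hexdecimal.length == 2 then hexdecimal else "0" ++ hexdecimal

-- ===== PORT B =====
-- '%02X': closed-form two-digit uppercase hex
def pvHexCharB (d : Nat) : Char := "0123456789ABCDEF".toList.getD d '0'

def dec_to_hexdec_alt (number : Int) : String :=
  if number ≤ 0 then "00"
  else if number > 255 then "FF"
  else String.ofList [pvHexCharB (number.toNat / 16), pvHexCharB (number.toNat % 16)]

-- ===== PRECONDITION & SPEC =====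
def Spec_dec_to_hexdec (number : Int) (out : String) : Prop := out = dec_to_hexdec_alt number
instance (number : Int) (out : String) : Decidable (Spec_dec_to_hexdec number out) := by unfold Spec_dec_to_hexdec; infer_instance

-- ===== CLAIM (what is proved, stated in full; the proofs are below) =====
def Claim_equal_dec_to_hexdec : Prop := ∀ (number : Int), Dom_dec_to_hexdec number → Spec_dec_to_hexdec number (dec_to_hexdec number)

-- ===== LEMMAS AND PROOFS =====
set_option maxRecDepth 4096 in
theorem dec_to_hexdec_eq_alt_small :
    ∀ k : Fin 256, dec_to_hexdec (k : Int) = dec_to_hexdec_alt (k : Int) := by decide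

-- ===== VERDICT (by name: the statement is the Claim_ definition above) =====
theorem dec_to_hexdec_spec : Claim_equal_dec_to_hexdec := by
  intro n _
  unfold Spec_dec_to_hexdec
  by_cases h0 : n ≤ 0
  · simp [dec_to_hexdec, dec_to_hexdec_alt, h0]
  · by_cases h255 : n > 255
    · simp [dec_to_hexdec, dec_to_hexdec_alt, h0, h255]
    · have hk : n = ((⟨n.toNat, by omega⟩ : Fin 256) : Int) := by
        simp; omega
      rw [hk]
      exact dec_to_hexdec_eq_alt_small _
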